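-- pv_equiv track=rewrite | github.com/sahmed73/post_processing_MD_PHD | Nspecies_VS_Ncarbon.py | count_carbon
-- ===== SOURCE A (Python) =====
-- def count_carbon(formula):
--     i = formula.find('C')
--     count = ''
--     if i !=-1:
--         for j in range(i+1,len(formula)):
--             if formula[j].isdigit():
--                 count+=formula[j]
--             if not formula[j].isdigit():
--                 break
--         if not count: count+='1'
--     if count:
--         count = int(count)
--     else:
--         count = 0
--     return count
-- ===== SOURCE B (Python) =====
-- import re
--
-- def count_carbon(formula):
--     m = re.search(r'C(\d*)', formula)
--     if m is None:
--         return 0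
--     digits = m.group(1)
--     return int(digits) if digits else 1
-- ===== Notes on version B (the rewrite author's own statement) =====
-- stated objective: idiomatic
-- what changed: Replaces the manual find-then-character-loop (with string accumulation and a break) by a single regular-expression search C(\d*) whose captured group is the digit run; empty group maps to 1 and no match to 0.
import Mathlib
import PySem

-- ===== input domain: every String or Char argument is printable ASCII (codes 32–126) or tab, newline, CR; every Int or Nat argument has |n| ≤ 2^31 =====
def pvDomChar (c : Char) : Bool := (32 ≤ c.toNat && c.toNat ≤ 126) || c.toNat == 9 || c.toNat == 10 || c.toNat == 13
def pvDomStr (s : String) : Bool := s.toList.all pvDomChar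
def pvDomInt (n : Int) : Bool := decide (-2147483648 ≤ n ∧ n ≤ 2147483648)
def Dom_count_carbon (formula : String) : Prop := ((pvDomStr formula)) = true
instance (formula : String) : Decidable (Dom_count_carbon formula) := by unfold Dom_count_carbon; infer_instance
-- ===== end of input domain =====

-- B (idiomatic): a single regex search C(\d*) replaces A's manual find + character loop;
-- empty captured group maps to 1, no match to 0. Equal return value on every input.

-- ===== PORT A =====
-- A's inner loop 'for j in range(i+1, len(formula)): if digit append; if not digit break'
-- transliterated as structural recursion over the suffix formula[i+1:] with the same
-- string accumulator (Char.isDigit = str.isdigit on the ASCII domain).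
def pvALoop : List Char → List Char → List Char
  | [], count => count
  | c :: rest, count => if c.isDigit then pvALoop rest (count ++ [c]) else count

def count_carbon (formula : String) : Int :=
  let i := PySem.Str.find formula "C"
  let count : List Char :=
    if i ≠ -1 then
      let run := pvALoop (formula.toList.drop (i + 1).toNat) []
      if run.isEmpty then run ++ ['1'] else run
    else []
  if !count.isEmpty then (PySem.Int.ofChars? count).getD 0 else 0

-- ===== PORT B =====
-- PySem has no regex; re.search(r'C(\d*)', formula) is ported by hand, exactly:
-- the first match starts at the first 'C' (no match iff no 'C'), and the greedy
-- captured group (\d*) is the maximal digit run right after it.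
def count_carbon_alt (formula : String) : Int :=
  match formula.toList.dropWhile (· ≠ 'C') with
  | [] => 0
  | _ :: rest =>
    let digits := rest.takeWhile Char.isDigit
    if digits.isEmpty then 1 else (PySem.Int.ofChars? digits).getD 0

-- ===== PRECONDITION & SPEC =====
def Spec_count_carbon (formula : String) (out : Int) : Prop := out = count_carbon_alt formula
instance (formula : String) (out : Int) : Decidable (Spec_count_carbon formula out) := by unfold Spec_count_carbon; infer_instance

-- ===== CLAIM (what is proved, stated in full; the proofs are below) =====
def Claim_equal_count_carbon : Prop := ∀ (formula : String), Dom_count_carbon formula → Spec_count_carbon formula (count_carbon formula)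

-- ===== LEMMAS AND PROOFS =====

theorem pvALoop_eq_takeWhile (l acc : List Char) :
    pvALoop l acc = acc ++ l.takeWhile Char.isDigit := by
  induction l generalizing acc with
  | nil => simp [pvALoop]
  | cons c rest ih =>
    by_cases h : c.isDigit <;> simp [pvALoop, h, ih]

theorem pvFindGo_spec (cs : List Char) (k : Nat) :
    ('C' ∉ cs → PySem.Chars.find.go ['C'] cs k = -1) ∧
    ('C' ∈ cs → PySem.Chars.find.go ['C'] cs k = k + (cs.takeWhile (· ≠ 'C')).length) := by
  induction cs generalizing k with
  | nil => simp [PySem.Chars.find.go]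
  | cons c rest ih =>
    by_cases h : c = 'C'
    · subst h
      constructor
      · intro hmem; exact absurd (List.mem_cons_self) hmem
      · intro _
        simp [PySem.Chars.find.go, List.isPrefixOf]
    · have hpre : (['C'].isPrefixOf (c :: rest)) = false := by
        simp [List.isPrefixOf]; exact fun hc => absurd hc.symm h
      constructor
      · intro hmem
        have : 'C' ∉ rest := fun hr => hmem (List.mem_cons_of_mem _ hr)
        simp [PySem.Chars.find.go, hpre, (ih (k + 1)).1 this]
      · intro hmem
        have hr : 'C' ∈ rest := by
          rcases List.mem_cons.mp hmem with h1 | h1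
          · exact absurd h1.symm h
          · exact h1
        have := (ih (k + 1)).2 hr
        simp [PySem.Chars.find.go, hpre, this, h]
        ring

theorem pvDropWhile_drop (cs : List Char) (p : Char → Bool) :
    cs.dropWhile p = cs.drop (cs.takeWhile p).length := by
  induction cs with
  | nil => simp
  | cons c rest ih =>
    by_cases h : p c <;> simp [h, ih]

-- ===== VERDICT (by name: the statement is the Claim_ definition above) =====
theorem count_carbon_spec : Claim_equal_count_carbon := by
  intro formula _
  unfold Spec_count_carbon count_carbon count_carbon_alt
  have hgo : PySem.Str.find formula "C" = PySem.Chars.find.go ['C'] formula.toList 0 := rfl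
  rw [hgo]
  set cs := formula.toList with hcs
  by_cases hmem : 'C' ∈ cs
  · rw [(pvFindGo_spec cs 0).2 hmem]
    set t := cs.takeWhile (· ≠ 'C') with ht
    have hdw : cs.dropWhile (· ≠ 'C') = cs.drop t.length := by
      rw [ht]; exact pvDropWhile_drop cs _
    have hne : cs.dropWhile (· ≠ 'C') ≠ [] := by
      intro h
      have := List.dropWhile_eq_nil_iff.mp h 'C' hmem
      simp at this
    obtain ⟨c0, rest, hsplit⟩ := List.exists_cons_of_ne_nil hne
    have hrest : cs.drop (t.length + 1) = rest := by
      have h1 : (cs.dropWhile (· ≠ 'C')).tail = rest := by rw [hsplit]; rfl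
      rw [← h1, hdw, List.tail_drop]
    have h1 : (PySem.Int.ofChars? ['1']).getD 0 = 1 := by decide
    have hsplit' : cs.dropWhile (fun x => !decide (x = 'C')) = c0 :: rest := by
      simpa using hsplit
    by_cases hd : rest.takeWhile Char.isDigit = []
    · simp [hrest, hsplit', pvALoop_eq_takeWhile, hd, h1]
    · simp [hrest, hsplit', pvALoop_eq_takeWhile, hd]
  · rw [(pvFindGo_spec cs 0).1 hmem]
    have hdw : cs.dropWhile (· ≠ 'C') = [] := by
      rw [List.dropWhile_eq_nil_iff]
      intro x hx
      simp only [ne_eq, decide_eq_true_eq]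
      exact fun h => hmem (h ▸ hx)
    have hdw' : cs.dropWhile (fun x => !decide (x = 'C')) = [] := by simpa using hdw
    simp [hdw']
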